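-- pv_equiv track=rewrite | github.com/itsdibas/MaratonaProg | Aula6/vasyapetya.py | questions
-- ===== SOURCE A (Python) =====
-- def sieve(n):
--     primes = [True for _ in range(n+1)]
--     p = 2
--     while p * p <= n:
--         if primes[p] == True:
--             for i in range(p * p, n+1, p):
--                 primes[i] = False
--         p += 1
--     return [p for p in range(2, n+1) if primes[p]]
--
-- def questions(n):
--     primes = sieve(n)
--     questions = []
--     for p in primes:
--         i = p
--         while i <= n:
--             questions.append(i)
--             i *= p
--     return questions
-- ===== SOURCE B (Python) =====
-- def _is_prime(p):
--     d = 2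
--     while d * d <= p:
--         if p % d == 0:
--             return False
--         d += 1
--     return True
--
-- def questions(n):
--     out = []
--     for p in range(2, n + 1):
--         if _is_prime(p):
--             i = p
--             while i <= n:
--                 out.append(i)
--                 i *= p
--     return out
-- ===== Notes on version B (the rewrite author's own statement) =====
-- stated objective: alternative
-- what changed: Replaces the Eratosthenes boolean mark array with direct trial-division primality testing inside a single ascending pass over 2..n, maintaining nothing but the output list.
import Mathlib
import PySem

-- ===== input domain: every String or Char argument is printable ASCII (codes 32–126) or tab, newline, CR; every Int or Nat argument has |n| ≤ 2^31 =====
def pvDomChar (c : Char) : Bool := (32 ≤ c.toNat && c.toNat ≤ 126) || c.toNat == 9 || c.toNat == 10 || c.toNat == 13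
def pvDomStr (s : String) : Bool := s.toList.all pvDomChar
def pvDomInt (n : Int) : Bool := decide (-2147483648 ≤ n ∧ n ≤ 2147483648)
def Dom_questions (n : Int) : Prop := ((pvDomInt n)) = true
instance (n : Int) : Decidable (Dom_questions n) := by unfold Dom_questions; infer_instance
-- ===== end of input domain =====

-- B replaces A's Eratosthenes boolean mark array by direct trial-division primality tests
-- in one ascending pass (alternative decomposition; no speed claim).

-- termination helper cited by both while-loop ports: p*p ≤ n bounds p by n
theorem pv_sq_le_imp_le (p n : Int) (h : p * p ≤ n) : p ≤ n := by
  by_cases hp : p ≤ 0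
  · nlinarith [mul_self_nonneg p]
  · nlinarith

-- ===== PORT A =====
-- 'while p * p <= n: if primes[p]: for i in range(p*p, n+1, p): primes[i] = False; p += 1'
def sieveLoop (n : Int) (primes : List Bool) (p : Int) : List Bool :=
  if _h : p * p ≤ n then
    if PySem.List.pyGetD primes p false then
      sieveLoop n
        ((PySem.List.pyRange (p * p) (n + 1) p).foldl
          (fun pr i => PySem.List.pySetD pr i false) primes)
        (p + 1)
    else
      sieveLoop n primes (p + 1)
  else primes
termination_by (n + 1 - p).toNat
decreasing_by all_goals (have := pv_sq_le_imp_le p n _h; omega)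

def sieve (n : Int) : List Int :=
  let primes0 := (PySem.List.pyRange 0 (n + 1) 1).map (fun _ => true)
  let primes := sieveLoop n primes0 2
  (PySem.List.pyRange 2 (n + 1) 1).filter (fun p => PySem.List.pyGetD primes p false)

-- inner loop 'i = p; while i <= n: out.append(i); i *= p', textually identical in both
-- Pythons (fuel n.toNat+1 exceeds the iteration count, which is logarithmic since p ≥ 2)
def powloop : Nat → Int → Int → Int → List Int
  | 0, _, _, _ => []
  | f + 1, n, p, i => if i ≤ n then i :: powloop f n p (i * p) else []

def questions (n : Int) : List Int :=
  (sieve n).foldl (fun acc p => acc ++ powloop (n.toNat + 1) n p p) []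

-- ===== PORT B =====
-- '_is_prime: d = 2; while d*d <= p: if p % d == 0: return False; d += 1; return True'
def isPrimeLoop (p d : Int) : Bool :=
  if _h : d * d ≤ p then
    if PySem.Int.mod p d = 0 then false else isPrimeLoop p (d + 1)
  else true
termination_by (p + 1 - d).toNat
decreasing_by have := pv_sq_le_imp_le d p _h; omega

def questions_alt (n : Int) : List Int :=
  (PySem.List.pyRange 2 (n + 1) 1).foldl
    (fun acc p =>
      if isPrimeLoop p 2 then acc ++ powloop (n.toNat + 1) n p p else acc) []

-- ===== PRECONDITION & SPEC =====
def Spec_questions (n : Int) (out : List Int) : Prop := out = questions_alt n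
instance (n : Int) (out : List Int) : Decidable (Spec_questions n out) := by unfold Spec_questions; infer_instance

-- ===== CLAIM (what is proved, stated in full; the proofs are below) =====
def Claim_equal_questions : Prop := ∀ (n : Int), Dom_questions n → Spec_questions n (questions n)

-- ===== LEMMAS AND PROOFS =====

-- i has a divisor d with 2 ≤ d and d*d ≤ i
def hasFac (i : Int) : Prop := ∃ d, 2 ≤ d ∧ d * d ≤ i ∧ d ∣ i

-- which entries the sieve has cleared after the stages 2, …, P-1
def markedBy (P i : Int) : Prop := ∃ q, 2 ≤ q ∧ q < P ∧ q ∣ i ∧ q * q ≤ i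

-- trial division from d computes "no divisor e ≥ d with e*e ≤ p"
theorem isPrimeLoop_iff (p d : Int) (hd : 2 ≤ d) :
    isPrimeLoop p d = true ↔ ∀ e, d ≤ e → e * e ≤ p → ¬ e ∣ p := by
  induction d using isPrimeLoop.induct p with
  | case1 d h hm =>
    rw [isPrimeLoop, dif_pos h, if_pos hm]
    simp only [Bool.false_eq_true, false_iff]
    rw [PySem.Int.mod_eq_zero_iff_dvd] at hm
    push Not
    exact ⟨d, le_refl d, h, hm⟩
  | case2 d h hm ih =>
    rw [isPrimeLoop, dif_pos h, if_neg hm]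
    rw [ih (by omega)]
    constructor
    · intro hall e he hee hdvd
      rcases eq_or_lt_of_le he with rfl | hlt
      · exact hm (by rw [PySem.Int.mod_eq_zero_iff_dvd]; exact hdvd)
      · exact hall e (by omega) hee hdvd
    · intro hall e he hee hdvd
      exact hall e (by omega) hee hdvd
  | case3 d h =>
    rw [isPrimeLoop, dif_neg h]
    simp only [true_iff]
    intro e he hee hdvd
    have : d * d ≤ e * e := by nlinarith
    omega

-- the marking pass preserves the array length
theorem fold_mark_len (l : List Int) (xs : List Bool) :
    (l.foldl (fun pr j => PySem.List.pySetD pr j false) xs).length = xs.length := by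
  induction l generalizing xs with
  | nil => rfl
  | cons j t ih => simp only [List.foldl_cons]; rw [ih, PySem.List.length_pySetD]

-- the marking pass clears exactly the listed indices
theorem fold_mark_get (l : List Int) (xs : List Bool) (i : Int)
    (hl : ∀ j ∈ l, 0 ≤ j ∧ j < (xs.length : Int)) (hi : 0 ≤ i) (hilen : i < (xs.length : Int)) :
    PySem.List.pyGetD (l.foldl (fun pr j => PySem.List.pySetD pr j false) xs) i false
      = if i ∈ l then false else PySem.List.pyGetD xs i false := by
  induction l generalizing xs with
  | nil => simp
  | cons j t ih =>
    obtain ⟨hj0, hjlen⟩ := hl j (List.mem_cons_self ..)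
    have hlen' : (PySem.List.pySetD xs j false).length = xs.length := PySem.List.length_pySetD ..
    simp only [List.foldl_cons]
    rw [ih (PySem.List.pySetD xs j false)
        (fun r hr => by rw [hlen']; exact hl r (List.mem_cons_of_mem _ hr))
        (by rw [hlen']; exact hilen)]
    have hset : PySem.List.pyGetD (PySem.List.pySetD xs j false) i false
        = if i = j then false else PySem.List.pyGetD xs i false := by
      rw [PySem.List.pySetD_of_nonneg xs false hj0,
          PySem.List.pyGetD_eq_getElem _ _ hi (by simpa using hilen),
          PySem.List.pyGetD_eq_getElem _ _ hi hilen]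
      rw [List.getElem_set]
      rcases eq_or_ne i j with rfl | hne
      · simp
      · rw [if_neg (by omega), if_neg hne]
    rw [hset]
    by_cases hit : i ∈ t
    · simp [hit]
    · by_cases hij : i = j
      · simp [hij]
      · simp [hit, hij, List.mem_cons]

-- sieve-loop invariant: entry j reads true iff no stage < p has cleared it;
-- after the loop, entry i reads true iff i has no divisor d ≥ 2 with d*d ≤ i
theorem sieveLoop_get (n : Int) (primes : List Bool) (p : Int) :
    2 ≤ p → primes.length = (n + 1).toNat →
    (∀ j, 0 ≤ j → j ≤ n → (PySem.List.pyGetD primes j false = true ↔ ¬ markedBy p j)) →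
    ∀ i, 0 ≤ i → i ≤ n →
      (PySem.List.pyGetD (sieveLoop n primes p) i false = true ↔ ¬ hasFac i) := by
  induction primes, p using sieveLoop.induct n with
  | case1 primes p h hb ih =>
    intro hp hlen hx i hi0 hin
    have hn4 : 4 ≤ n := by nlinarith
    have hlenInt : (primes.length : Int) = n + 1 := by rw [hlen]; omega
    rw [sieveLoop, dif_pos h, if_pos hb]
    have memR : ∀ j : Int, j ≤ n →
        (j ∈ PySem.List.pyRange (p * p) (n + 1) p ↔ p ∣ j ∧ p * p ≤ j) := by
      intro j hjn
      rw [PySem.List.mem_pyRange_iff_of_pos (by omega)]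
      constructor
      · rintro ⟨h1, _, h3⟩
        refine ⟨?_, h1⟩
        have := dvd_add h3 (dvd_mul_right p p)
        simpa using this
      · rintro ⟨h1, h2⟩
        exact ⟨h2, by omega, dvd_sub h1 (dvd_mul_right p p)⟩
    apply ih (by omega) (by rw [fold_mark_len, hlen])
    · intro j hj0 hjn
      rw [fold_mark_get _ _ _ ?hl hj0 (by omega)]
      case hl =>
        intro r hr
        rw [PySem.List.mem_pyRange_iff_of_pos (by omega)] at hr
        constructor
        · nlinarith [hr.1]
        · omega
      by_cases hjR : j ∈ PySem.List.pyRange (p * p) (n + 1) p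
      · rw [if_pos hjR]
        rw [memR j hjn] at hjR
        simp only [Bool.false_eq_true, false_iff, not_not]
        exact ⟨p, hp, by omega, hjR.1, hjR.2⟩
      · rw [if_neg hjR, hx j hj0 hjn]
        rw [memR j hjn] at hjR
        constructor
        · rintro hnm ⟨q, hq2, hqlt, hqd, hqq⟩
          rcases lt_or_eq_of_le (by omega : q ≤ p) with hlt | rfl
          · exact hnm ⟨q, hq2, hlt, hqd, hqq⟩
          · exact hjR ⟨hqd, hqq⟩
        · rintro hnm ⟨q, hq2, hqlt, hqd, hqq⟩
          exact hnm ⟨q, hq2, by omega, hqd, hqq⟩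
    · exact hi0
    · exact hin
  | case2 primes p h hb ih =>
    intro hp hlen hx i hi0 hin
    have hppn : p ≤ n := by nlinarith
    have hmk : markedBy p p := by
      by_contra hc
      exact hb ((hx p (by omega) hppn).mpr hc)
    obtain ⟨r, hr2, hrlt, hrd, hrr⟩ := hmk
    rw [sieveLoop, dif_pos h, if_neg hb]
    apply ih (by omega) hlen
    · intro j hj0 hjn
      rw [hx j hj0 hjn]
      constructor
      · rintro hnm ⟨q, hq2, hqlt, hqd, hqq⟩
        rcases lt_or_eq_of_le (by omega : q ≤ p) with hlt | rfl
        · exact hnm ⟨q, hq2, hlt, hqd, hqq⟩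
        · exact hnm ⟨r, hr2, hrlt, dvd_trans hrd hqd, by nlinarith⟩
      · rintro hnm ⟨q, hq2, hqlt, hqd, hqq⟩
        exact hnm ⟨q, hq2, by omega, hqd, hqq⟩
    · exact hi0
    · exact hin
  | case3 primes p h =>
    intro hp hlen hx i hi0 hin
    rw [sieveLoop, dif_neg h, hx i hi0 hin]
    constructor
    · rintro hnm ⟨d, hd2, hdd, hddvd⟩
      have hdp : d < p := by nlinarith
      exact hnm ⟨d, hd2, hdp, hddvd, hdd⟩
    · rintro hnm ⟨q, hq2, hqlt, hqd, hqq⟩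
      exact hnm ⟨q, hq2, hqq, hqd⟩

-- the sieve's surviving entries are exactly the numbers trial division accepts
theorem sieve_eq_filter_isPrime (n : Int) :
    sieve n = (PySem.List.pyRange 2 (n + 1) 1).filter (fun p => isPrimeLoop p 2) := by
  unfold sieve
  apply List.filter_congr
  intro x hx
  rw [PySem.List.mem_pyRange_one] at hx
  rw [Bool.eq_iff_iff]
  rw [sieveLoop_get n _ 2 (by omega)
      (by simp [PySem.List.length_pyRange_one])
      (fun j hj0 hjn => by
        rw [PySem.List.pyGetD_eq_getElem _ _ hj0
            (by simp [PySem.List.length_pyRange_one]; omega)]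
        simp only [List.getElem_map, true_iff]
        rintro ⟨q, hq2, hqlt, _, _⟩; omega)
      x (by omega) (by omega)]
  rw [isPrimeLoop_iff x 2 (le_refl 2)]
  unfold hasFac
  push Not
  rfl

-- ===== VERDICT (by name: the statement is the Claim_ definition above) =====
theorem questions_spec : Claim_equal_questions := by
  intro n _
  unfold Spec_questions questions questions_alt
  rw [PySem.List.foldl_if_eq_foldl_filter (fun p => isPrimeLoop p 2)
      (fun acc p => acc ++ powloop (n.toNat + 1) n p p)]
  rw [PySem.List.foldl_append_eq_flatMap, PySem.List.foldl_append_eq_flatMap]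
  rw [sieve_eq_filter_isPrime]
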